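-- pv_equiv track=rewrite | github.com/IgrMd/yandex-algos-training | Тренировки по алгоритмам 6.0/Лекция 3. Стеки, очереди, деки/G.py | order_checkout_place
-- ===== SOURCE A (Python) =====
-- class Queue:
--     def __init__(self, cap: int):
--         self.capacity = cap
--         self.size = self.l = self.r = 0
--         self.buf = [0] * cap
--
--     def front(self):
--         if not self.size:
--             raise RuntimeError("Empty")
--         return self.buf[self.l]
--
--     def back(self):
--         if not self.size:
--             raise RuntimeError("Empty")
--         return self.buf[self.r - 1]
--
--     def push_back(self, item):
--         if self.capacity == self.size:
--             raise RuntimeError("Full")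
--         self.buf[self.r] = item
--         self.r = (self.r + 1) % self.capacity
--         self.size += 1
--
--     def push_front(self, item):
--         if self.capacity == self.size:
--             raise RuntimeError("Full")
--         self.l = self.l - 1 if self.l else self.capacity - 1
--         self.buf[self.l] = item
--         self.size += 1
--
--     def pop_back(self):
--         if not self.size:
--             raise RuntimeError("Empty")
--         self.r = self.r - 1 if self.r else self.capacity - 1
--         self.size -= 1
--         return self.buf[(self.r + 1) % self.capacity]
--
--     def pop_front(self):
--         if not self.size:
--             raise RuntimeError("Empty")
--         self.l = (self.l + 1) % self.capacity
--         self.size -= 1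
--         return self.buf[self.l - 1]
--
--     def __len__(self) -> int:
--         return self.size
--
--     def __repr__(self):
--         return str(self.buf)
--
-- def order_checkout_place(n, b, clients):
--     ans = 0
--     queue = Queue(n)
--     minute = 0
--     while minute < n:
--         queue.push_back((minute, clients[minute]))
--         can_handle = b
--         while queue and can_handle > 0:
--             minute_in, count = queue.pop_front()
--             clients_handled = min(can_handle, count)
--             ans += (minute - minute_in + 1) * clients_handled
--             can_handle -= clients_handled
--             count -= clients_handled
--             if count:
--                 queue.push_front((minute_in, count))
--         minute += 1
--
--     while queue:
--         minute_in, count = queue.pop_front()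
--         ans += (minute - minute_in + 1) * count
--     return ans
-- ===== SOURCE B (Python) =====
-- def order_checkout_place(n, b, clients):
--     # Flat two-pointer state machine: j = current batch (arrival minute), m = service
--     # minute, can = capacity left in minute m, rem = unserved remainder of batch j.
--     ans = 0
--     j = 0
--     m = 0
--     can = b
--     rem = clients[0] if 0 < n else 0
--     while j < n:
--         if n <= m:
--             # service time is over: batch j goes away unserved
--             ans += (n - j + 1) * rem
--             j += 1
--             rem = clients[j] if j < n else 0
--         elif m < j:
--             # server idle until batch j arrives
--             m = j
--             can = b
--         elif can <= 0:
--             # minute m exhausted, move to the next minute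
--             m += 1
--             can = b
--         elif rem == 0:
--             # batch j is done: move to the next batch
--             j += 1
--             rem = clients[j] if j < n else 0
--         else:
--             handled = min(can, rem)
--             ans += (m - j + 1) * handled
--             rem -= handled
--             can -= handled
--             if rem == 0:
--                 j += 1
--                 rem = clients[j] if j < n else 0
--     return ans
-- ===== Notes on version B (the rewrite author's own statement) =====
-- stated objective: alternative
-- what changed: Replaces A's nested minute-loop over a hand-rolled ring-buffer Queue (push_back/pop_front/push_front of partially served batches) with a single flat while-loop state machine over two pointers: batch index j and service minute m, carrying only four integers (j, m, remaining capacity of minute m, remainder of batch j) and no queue at all; the final drain loop disappears into the same loop's 'time is over' branch.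
import Mathlib
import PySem

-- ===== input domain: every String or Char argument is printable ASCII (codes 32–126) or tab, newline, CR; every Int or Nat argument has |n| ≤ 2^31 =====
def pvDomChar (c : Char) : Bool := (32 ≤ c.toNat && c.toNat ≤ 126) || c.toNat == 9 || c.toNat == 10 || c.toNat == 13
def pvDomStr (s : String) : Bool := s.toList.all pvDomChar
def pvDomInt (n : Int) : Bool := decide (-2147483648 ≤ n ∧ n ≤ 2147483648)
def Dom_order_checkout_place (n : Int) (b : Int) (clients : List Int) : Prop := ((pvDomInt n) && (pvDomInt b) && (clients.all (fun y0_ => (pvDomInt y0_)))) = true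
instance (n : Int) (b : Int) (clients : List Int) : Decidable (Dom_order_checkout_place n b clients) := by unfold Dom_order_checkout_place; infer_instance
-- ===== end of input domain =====

-- B replaces A's nested minute-loop over a ring-buffer Queue by a single flat
-- two-pointer state machine (batch index / service minute) with no queue at all
-- (objective: alternative).

-- ===== PORT A =====
-- Python's Queue class: capacity/size/l/r plus a ring buffer `buf` ([0]*cap; the
-- placeholder (0,0) below is never read before the slot is overwritten).
structure PyQueue where
  capacity : Int
  size : Int
  l : Int
  r : Int
  buf : List (Int × Int)
deriving Repr, DecidableEq

def pyQueueInit (cap : Int) : PyQueue :=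
  ⟨cap, 0, 0, 0, List.replicate cap.toNat (0, 0)⟩

-- push_back; none = the RuntimeError("Full") raise (buf[r] write is always in range when it happens)
def qPushBack (q : PyQueue) (item : Int × Int) : Option PyQueue :=
  if q.capacity = q.size then none
  else some { q with buf := PySem.List.pySetD q.buf q.r item,
                     r := PySem.Int.mod (q.r + 1) q.capacity,
                     size := q.size + 1 }

-- push_front; none = the RuntimeError("Full") raise
def qPushFront (q : PyQueue) (item : Int × Int) : Option PyQueue :=
  if q.capacity = q.size then none
  else
    let l' := if q.l ≠ 0 then q.l - 1 else q.capacity - 1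
    some { q with l := l', buf := PySem.List.pySetD q.buf l' item, size := q.size + 1 }

-- pop_front; none = the RuntimeError("Empty") raise, or IndexError on buf[l-1]
def qPopFront (q : PyQueue) : Option ((Int × Int) × PyQueue) :=
  if q.size = 0 then none
  else
    let l' := PySem.Int.mod (q.l + 1) q.capacity
    match PySem.List.pyGet? q.buf (l' - 1) with
    | none => none
    | some v => some (v, { q with l := l', size := q.size - 1 })

-- `while queue and can_handle > 0:` body; fuel only makes the recursion structural
-- (q.size + 1 steps always suffice, see the proofs below)
def innerA (fuel : Nat) (minute can ans : Int) (q : PyQueue) : Option (Int × PyQueue) :=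
  match fuel with
  | 0 => none
  | f + 1 =>
    if q.size ≠ 0 ∧ can > 0 then
      match qPopFront q with
      | none => none
      | some ((minute_in, count), q1) =>
        let handled := min can count
        let ans1 := ans + (minute - minute_in + 1) * handled
        let can1 := can - handled
        let count1 := count - handled
        if count1 ≠ 0 then
          match qPushFront q1 (minute_in, count1) with
          | none => none
          | some q2 => innerA f minute can1 ans1 q2
        else innerA f minute can1 ans1 q1
    else some (ans, q)

-- one iteration of `while minute < n` (ported as a fold over range(n); minute only steps by 1)
def stepA (b : Int) (clients : List Int) (st : Option (Int × PyQueue)) (minute : Int) :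
    Option (Int × PyQueue) :=
  match st with
  | none => none
  | some (ans, q) =>
    match PySem.List.pyGet? clients minute with  -- clients[minute]; none = IndexError
    | none => none
    | some c =>
      match qPushBack q (minute, c) with
      | none => none
      | some q1 => innerA (q1.size.toNat + 1) minute b ans q1

-- final `while queue:` drain; fuel = q.size is exact
def drainA (fuel : Nat) (minute ans : Int) (q : PyQueue) : Option Int :=
  match fuel with
  | 0 => if q.size = 0 then some ans else none
  | f + 1 =>
    if q.size ≠ 0 then
      match qPopFront q with
      | none => none
      | some ((minute_in, count), q1) =>
        drainA f minute (ans + (minute - minute_in + 1) * count) q1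
    else some ans

def order_checkout_place (n : Int) (b : Int) (clients : List Int) : Int :=
  match (PySem.List.pyRange 0 n 1).foldl (stepA b clients) (some (0, pyQueueInit n)) with
  | none => 0  -- unreachable under Pre_: Python raises there
  | some (ans, q) => (drainA q.size.toNat n ans q).getD 0

-- ===== PORT B =====
-- Source B's `clients[j] if j < n else 0` reload expression
def bReload (n : Int) (clients : List Int) (j : Int) : Int :=
  if j < n then (PySem.List.pyGet? clients j).getD 0 else 0

-- explicit bound on the number of iterations Source B's while loop still performs from a
-- given state (proved sufficient below); the port runs the loop on this fuel
def bMeas (n j m can rem : Int) : Nat :=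
  3 * (n - j).toNat + 2 * (n - m).toNat + (if rem = 0 then 0 else 1) +
    (if 0 < can then 1 else 0)

-- Source B's single `while j < n` loop, branch for branch (h := min(can, rem) inlined);
-- fuel only makes the recursion structural, it never runs out (see bLoop_ext below)
def bLoop (fuel : Nat) (n b : Int) (clients : List Int) (j m can rem ans : Int) : Int :=
  match fuel with
  | 0 => ans
  | f + 1 =>
    if j < n then
      if n ≤ m then
        bLoop f n b clients (j + 1) m can (bReload n clients (j + 1)) (ans + (n - j + 1) * rem)
      else if m < j then
        bLoop f n b clients j j b rem ans
      else if can ≤ 0 then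
        bLoop f n b clients j (m + 1) b rem ans
      else if rem = 0 then
        bLoop f n b clients (j + 1) m can (bReload n clients (j + 1)) ans
      else if rem - min can rem = 0 then
        bLoop f n b clients (j + 1) m (can - min can rem) (bReload n clients (j + 1))
          (ans + (m - j + 1) * min can rem)
      else
        bLoop f n b clients j m (can - min can rem) (rem - min can rem)
          (ans + (m - j + 1) * min can rem)
    else ans

def order_checkout_place_alt (n : Int) (b : Int) (clients : List Int) : Int :=
  bLoop (bMeas n 0 0 b (bReload n clients 0) + 1) n b clients 0 0 b (bReload n clients 0) 0

-- ===== PRECONDITION & SPEC =====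
-- Pre_ excludes exactly the inputs where Python A raises IndexError on clients[minute]
-- (i.e. 0 < n and n > len(clients)); B raises there too.
def Pre_order_checkout_place (n : Int) (b : Int) (clients : List Int) : Prop :=
  0 < n → n ≤ (clients.length : Int)
instance (n : Int) (b : Int) (clients : List Int) : Decidable (Pre_order_checkout_place n b clients) := by
  unfold Pre_order_checkout_place; infer_instance

def pvWitness_order_checkout_place : Int × Int × List Int := (3, 2, [1, 5, 0])

def Spec_order_checkout_place (n : Int) (b : Int) (clients : List Int) (out : Int) : Prop := out = order_checkout_place_alt n b clients
instance (n : Int) (b : Int) (clients : List Int) (out : Int) : Decidable (Spec_order_checkout_place n b clients out) := by unfold Spec_order_checkout_place; infer_instance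

-- ===== CLAIM (what is proved, stated in full; the proofs are below) =====
def Claim_equal_order_checkout_place : Prop := ∀ (n : Int) (b : Int) (clients : List Int), Dom_order_checkout_place n b clients → Pre_order_checkout_place n b clients → Spec_order_checkout_place n b clients (order_checkout_place n b clients)

-- ===== LEMMAS AND PROOFS =====

-- Proof-side intermediate model M of A's queue: the queue always holds the batches of
-- the contiguous minute range [head, minute], batch i with remaining count counts[i].
def innerM (fuel : Nat) (minute can ans head : Int) (counts : List Int) :
    Int × Int × List Int :=
  match fuel with
  | 0 => (ans, head, counts)
  | f + 1 =>
    if head ≤ minute ∧ can > 0 then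
      let c := (PySem.List.pyGet? counts head).getD 0
      let handled := min can c
      let ans1 := ans + (minute - head + 1) * handled
      let counts1 := PySem.List.pySetD counts head (c - handled)
      let can1 := can - handled
      if c - handled = 0 then innerM f minute can1 ans1 (head + 1) counts1
      else innerM f minute can1 ans1 head counts1
    else (ans, head, counts)

def stepM (b : Int) (clients : List Int) (st : Option (Int × Int × List Int)) (minute : Int) :
    Option (Int × Int × List Int) :=
  match st with
  | none => none
  | some (ans, head, counts) =>
    match PySem.List.pyGet? clients minute with
    | none => none
    | some c =>
      some (innerM ((minute - head + 1).toNat + 1) minute b ans head (counts ++ [c]))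

-- The invariant relating A's ring buffer to M: it holds exactly the pairs
-- (i, counts[i]) for i ∈ [head, m], stored at buffer slot i, with l = head % n.
structure QInv (n m head : Int) (counts : List Int) (q : PyQueue) : Prop where
  head_nonneg : 0 ≤ head
  head_le : head ≤ m + 1
  cap : q.capacity = n
  size : q.size = m + 1 - head
  lval : q.l = PySem.Int.mod head n
  buflen : q.buf.length = n.toNat
  countslen : (counts.length : Int) = m + 1
  entries : ∀ i : Int, head ≤ i → i ≤ m →
    q.buf[i.toNat]? = some (i, (PySem.List.pyGet? counts i).getD 0)

theorem modSmall {n a : Int} (hn : 0 < n) (h0 : 0 ≤ a) (h : a < n) :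
    PySem.Int.mod a n = a := by
  rw [PySem.Int.mod_eq_emod_of_pos hn]; exact Int.emod_eq_of_lt h0 h

theorem popFront_eq {n head : Int} {q : PyQueue} {v : Int × Int}
    (hn : 0 < n) (hcap : q.capacity = n) (hl : q.l = PySem.Int.mod head n)
    (h0 : 0 ≤ head) (hhn : head < n) (hbl : q.buf.length = n.toNat)
    (hsz : q.size ≠ 0) (hv : q.buf[head.toNat]? = some v) :
    qPopFront q = some (v, { q with l := PySem.Int.mod (head + 1) n, size := q.size - 1 }) := by
  have hlh : q.l = head := by rw [hl, modSmall hn h0 hhn]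
  have hm : PySem.Int.mod (head + 1) n = if head + 1 = n then 0 else head + 1 := by
    split
    · rename_i h; rw [h, PySem.Int.mod_eq_emod_of_pos hn, Int.emod_self]
    · exact modSmall hn (by omega) (by omega)
  unfold qPopFront
  rw [if_neg hsz, hlh, hcap, hm]
  by_cases h1 : head + 1 = n
  · rw [if_pos h1]
    have hg : PySem.List.pyGet? q.buf ((0 : Int) - 1) = some v := by
      rw [show (0 : Int) - 1 = -1 by ring, PySem.List.pyGet?_neg_one,
          List.getLast?_eq_getElem?, hbl, ← hv]
      congr 1
      omega
    simp only [hg]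
  · rw [if_neg h1]
    have hg : PySem.List.pyGet? q.buf (head + 1 - 1) = some v := by
      rw [show head + 1 - 1 = head by ring, PySem.List.pyGet?_of_nonneg _ h0, hv]
    simp only [hg]

theorem pushFront_eq {n head : Int} {q : PyQueue} (v : Int × Int)
    (hn : 0 < n) (hcap : q.capacity = n) (hl : q.l = PySem.Int.mod (head + 1) n)
    (h0 : 0 ≤ head) (hhn : head < n) (hsz : q.size ≠ n) :
    qPushFront q v = some { q with l := head, buf := q.buf.set head.toNat v, size := q.size + 1 } := by
  unfold qPushFront
  rw [if_neg (by omega : ¬ q.capacity = q.size), hcap]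
  have hl' : (if q.l ≠ 0 then q.l - 1 else n - 1) = head := by
    rcases lt_or_eq_of_le (by omega : head + 1 ≤ n) with h1 | h1
    · rw [hl, modSmall hn (by omega) h1]; simp; omega
    · have : q.l = 0 := by rw [hl, h1, PySem.Int.mod_eq_emod_of_pos hn, Int.emod_self]
      rw [this]; simp; omega
  simp only [hl']
  rw [PySem.List.pySetD_of_nonneg _ _ h0]

theorem pushBack_eq {n k : Int} {q : PyQueue} (v : Int × Int)
    (hn : 0 < n) (hcap : q.capacity = n) (hr : q.r = PySem.Int.mod k n)
    (h0 : 0 ≤ k) (hkn : k < n) (hsz : q.size ≠ n) :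
    qPushBack q v = some { q with buf := q.buf.set k.toNat v,
                                  r := PySem.Int.mod (k + 1) n, size := q.size + 1 } := by
  unfold qPushBack
  rw [if_neg (by omega : ¬ q.capacity = q.size), hcap, hr, modSmall hn h0 hkn,
      PySem.List.pySetD_of_nonneg _ _ h0]

theorem innerA_stop (f : Nat) (minute can ans : Int) (q : PyQueue)
    (h : ¬ (q.size ≠ 0 ∧ can > 0)) : innerA (f + 1) minute can ans q = some (ans, q) := by
  unfold innerA; rw [if_neg h]

theorem innerM_stop (f : Nat) (minute can ans head : Int) (counts : List Int)
    (h : ¬ (head ≤ minute ∧ can > 0)) :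
    innerM f minute can ans head counts = (ans, head, counts) := by
  cases f with
  | zero => rfl
  | succ f => unfold innerM; rw [if_neg h]

theorem inner_sim {n : Int} (hn : 0 < n) {m : Int} (hm0 : 0 ≤ m) (hmn : m < n) :
    ∀ (fuel : Nat) (can ans head : Int) (counts : List Int) (q : PyQueue),
      QInv n m head counts q → (m + 1 - head).toNat + 1 ≤ fuel →
      ∃ ans' head' counts' q',
        innerA fuel m can ans q = some (ans', q') ∧
        innerM fuel m can ans head counts = (ans', head', counts') ∧
        QInv n m head' counts' q' ∧ q'.r = q.r := by
  intro fuel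
  induction fuel with
  | zero => intro can ans head counts q hinv hfuel; omega
  | succ f ih =>
    intro can ans head counts q hinv hfuel
    obtain ⟨h0, hle, hcap, hsz, hl, hbl, hcl, hent⟩ := hinv
    by_cases hc : head ≤ m ∧ can > 0
    · obtain ⟨hhm, hcan⟩ := hc
      have hvb := hent head le_rfl hhm
      have hpop := popFront_eq hn hcap hl h0 (by omega) hbl (by omega) hvb
      set c : Int := (PySem.List.pyGet? counts head).getD 0 with hc_def
      unfold innerA innerM
      rw [if_pos (show q.size ≠ 0 ∧ can > 0 from ⟨by omega, hcan⟩),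
          if_pos (show head ≤ m ∧ can > 0 from ⟨hhm, hcan⟩)]
      simp only [hpop]
      rw [PySem.List.pySetD_of_nonneg _ _ h0]
      by_cases hcnt : c - min can c = 0
      · -- batch finished: A drops the entry, M advances head
        rw [if_neg (show ¬ (c - min can c ≠ 0) by omega), if_pos hcnt]
        have hinv1 : QInv n m (head + 1) (counts.set head.toNat (c - min can c))
            { q with l := PySem.Int.mod (head + 1) n, size := q.size - 1 } := by
          refine ⟨by omega, by omega, hcap, by simp [hsz]; ring, rfl, hbl, by simpa using hcl, ?_⟩
          intro i hi1 hi2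
          have hne : head.toNat ≠ i.toNat := by omega
          rw [show PySem.List.pyGet? (counts.set head.toNat (c - min can c)) i
                = PySem.List.pyGet? counts i by
            rw [PySem.List.pyGet?_of_nonneg _ (by omega), PySem.List.pyGet?_of_nonneg _ (by omega),
                List.getElem?_set_ne hne]]
          exact hent i (by omega) hi2
        obtain ⟨a', h', cs', q', hA, hB, hI, hr⟩ :=
          ih (can - min can c) (ans + (m - head + 1) * min can c) (head + 1)
            (counts.set head.toNat (c - min can c)) _ hinv1 (by omega)
        exact ⟨a', h', cs', q', hA, hB, hI, hr⟩
      · -- capacity exhausted on this batch: A pushes the remainder back, can_handle = 0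
        have hhc : min can c = can := by rcases min_choice can c with h | h <;> omega
        rw [if_pos (show c - min can c ≠ 0 from hcnt), if_neg (show ¬ c - min can c = 0 from hcnt)]
        have hpush := pushFront_eq (head, c - min can c) hn
          (show ({ q with l := PySem.Int.mod (head + 1) n, size := q.size - 1 } : PyQueue).capacity = n from hcap)
          rfl h0 (by omega) (by simp [hsz]; omega)
        simp only [hpush]
        obtain ⟨f', rfl⟩ : ∃ f', f = f' + 1 := ⟨f - 1, by omega⟩
        rw [innerA_stop _ _ _ _ _ (by simp [hsz]; omega),
            innerM_stop _ _ _ _ _ _ (by omega)]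
        refine ⟨_, head, counts.set head.toNat (c - min can c), _, rfl, rfl, ?_, rfl⟩
        refine ⟨h0, hle, hcap, by simp [hsz], by rw [modSmall hn h0 (by omega)], by simpa using hbl,
          by simpa using hcl, ?_⟩
        intro i hi1 hi2
        rcases eq_or_lt_of_le hi1 with rfl | hlt
        · rw [List.getElem?_set_self (by omega),
              PySem.List.pyGet?_of_nonneg _ h0, List.getElem?_set_self (by omega)]
          rfl
        · have hne : head.toNat ≠ i.toNat := by omega
          rw [List.getElem?_set_ne hne,
              show PySem.List.pyGet? (counts.set head.toNat (c - min can c)) i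
                = PySem.List.pyGet? counts i by
            rw [PySem.List.pyGet?_of_nonneg _ (by omega), PySem.List.pyGet?_of_nonneg _ (by omega),
                List.getElem?_set_ne hne]]
          exact hent i (by omega) hi2
    · have hA : ¬ (q.size ≠ 0 ∧ can > 0) := by
        intro ⟨a, b2⟩; exact hc ⟨by omega, b2⟩
      rw [innerA_stop _ _ _ _ _ hA, innerM_stop _ _ _ _ _ _ hc]
      exact ⟨ans, head, counts, q, rfl, rfl, ⟨h0, hle, hcap, hsz, hl, hbl, hcl, hent⟩, rfl⟩

theorem outer_sim {n b : Int} {clients : List Int}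
    (hn : 0 < n) (hcl : n ≤ (clients.length : Int)) :
    ∀ k : Nat, (k : Int) ≤ n →
      ∃ ans head counts q,
        (PySem.List.pyRange 0 (k : Int) 1).foldl (stepA b clients) (some (0, pyQueueInit n))
          = some (ans, q) ∧
        (PySem.List.pyRange 0 (k : Int) 1).foldl (stepM b clients) (some (0, 0, []))
          = some (ans, head, counts) ∧
        QInv n ((k : Int) - 1) head counts q ∧ q.r = PySem.Int.mod (k : Int) n := by
  intro k
  induction k with
  | zero =>
    intro _
    refine ⟨0, 0, [], pyQueueInit n, ?_, ?_, ?_, ?_⟩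
    · rw [show ((0 : Nat) : Int) = 0 by simp, PySem.List.pyRange_one_eq_nil le_rfl]; rfl
    · rw [show ((0 : Nat) : Int) = 0 by simp, PySem.List.pyRange_one_eq_nil le_rfl]; rfl
    · exact ⟨le_rfl, by norm_num, rfl, by norm_num [pyQueueInit],
        (modSmall hn le_rfl hn).symm, by simp [pyQueueInit], by norm_num,
        fun i h1 h2 => absurd (le_trans h1 h2) (by norm_num)⟩
    · rw [show ((0 : Nat) : Int) = 0 by simp, modSmall hn le_rfl hn]; rfl
  | succ k ih =>
    intro hk1
    have hk : (k : Int) ≤ n := by push_cast at hk1 ⊢; omega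
    have hkn : (k : Int) < n := by push_cast at hk1; omega
    obtain ⟨ans, head, counts, q, hA, hB, hinv, hr⟩ := ih hk
    obtain ⟨h0, hle, hcap, hsz, hl, hbl, hclen, hent⟩ := hinv
    have hk0 : (0 : Int) ≤ (k : Int) := Int.natCast_nonneg k
    have hkl : k < clients.length := by
      have := hcl; omega
    have hget : PySem.List.pyGet? clients (k : Int) = some clients[k] := by
      simp [List.getElem?_eq_getElem hkl]
    have hclen' : counts.length = k := by omega
    set q1 : PyQueue := ⟨q.capacity, q.size + 1, q.l, PySem.Int.mod ((k : Int) + 1) n,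
      q.buf.set (k : Int).toNat ((k : Int), clients[k])⟩ with hq1
    have hpush : qPushBack q ((k : Int), clients[k]) = some q1 :=
      pushBack_eq _ hn hcap hr hk0 hkn (by omega)
    have hq1size : q1.size = (k : Int) - head + 1 := by rw [hq1]; simp; omega
    have hinv1 : QInv n (k : Int) head (counts ++ [clients[k]]) q1 := by
      refine ⟨h0, by omega, hcap, by omega, by rw [hq1]; simpa using hl,
        by rw [hq1]; simpa using hbl, by simp [hclen'], ?_⟩
      intro i hi1 hi2
      rcases eq_or_lt_of_le hi2 with rfl | hlt
      · rw [hq1]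
        simp only []
        rw [List.getElem?_set_self (by omega),
            show ((k : Int) : Int) = ((counts.length : Nat) : Int) by rw [hclen'],
            show counts ++ [clients[k]] = counts ++ clients[k] :: [] by simp,
            PySem.List.pyGet?_append_length]
        rfl
      · have hne : (k : Int).toNat ≠ i.toNat := by omega
        rw [hq1]
        simp only []
        rw [List.getElem?_set_ne hne,
            show PySem.List.pyGet? (counts ++ [clients[k]]) i = PySem.List.pyGet? counts i by
              rw [PySem.List.pyGet?_of_nonneg _ (by omega), PySem.List.pyGet?_of_nonneg _ (by omega),
                  List.getElem?_append_left (by omega)]]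
        exact hent i hi1 (by omega)
    obtain ⟨ans', head', counts', q', hA', hB', hI', hr'⟩ :=
      inner_sim hn hk0 hkn (((k : Int) - head + 1).toNat + 1) b ans head
        (counts ++ [clients[k]]) q1 hinv1 (by omega)
    have hrange : PySem.List.pyRange 0 ((k + 1 : Nat) : Int) 1
        = PySem.List.pyRange 0 (k : Int) 1 ++ [(k : Int)] := by
      rw [show ((k + 1 : Nat) : Int) = (k : Int) + 1 by push_cast; ring]
      exact PySem.List.pyRange_one_succ_right hk0
    refine ⟨ans', head', counts', q', ?_, ?_, ?_, ?_⟩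
    · rw [hrange, List.foldl_append, hA]
      simp only [List.foldl_cons, List.foldl_nil, stepA, hget, hpush]
      rw [show q1.size.toNat + 1 = ((k : Int) - head + 1).toNat + 1 by rw [hq1size]]
      exact hA'
    · rw [hrange, List.foldl_append, hB]
      simp only [List.foldl_cons, List.foldl_nil, stepM, hget]
      rw [hB']
    · rw [show ((k + 1 : Nat) : Int) - 1 = (k : Int) by push_cast; ring]
      exact hI'
    · rw [hr', hq1, show ((k + 1 : Nat) : Int) = (k : Int) + 1 by push_cast; ring]

theorem drain_sim {n : Int} (hn : 0 < n) {counts : List Int} :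
    ∀ (g : Nat) (head ans : Int) (q : PyQueue),
      QInv n (n - 1) head counts q → g = q.size.toNat →
      drainA g n ans q =
        some ((PySem.List.pyRange head n 1).foldl
          (fun a i => a + (n - i + 1) * (PySem.List.pyGet? counts i).getD 0) ans) := by
  intro g
  induction g with
  | zero =>
    intro head ans q hinv hg
    obtain ⟨h0, hle, hcap, hsz, hl, hbl, hclen, hent⟩ := hinv
    unfold drainA
    rw [if_pos (by omega : q.size = 0), PySem.List.pyRange_one_eq_nil (by omega : n ≤ head)]
    rfl
  | succ g ih =>
    intro head ans q hinv hg
    obtain ⟨h0, hle, hcap, hsz, hl, hbl, hclen, hent⟩ := hinv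
    have hhn : head < n := by omega
    have hpop := popFront_eq hn hcap hl h0 hhn hbl (by omega)
      (hent head le_rfl (by omega))
    unfold drainA
    rw [if_pos (by omega : q.size ≠ 0)]
    simp only [hpop]
    have hinv2 : QInv n (n - 1) (head + 1) counts
        { q with l := PySem.Int.mod (head + 1) n, size := q.size - 1 } :=
      ⟨by omega, by omega, hcap, by simp [hsz]; ring, rfl, hbl, hclen,
        fun i hi1 hi2 => hent i (by omega) hi2⟩
    rw [ih (head + 1) _ _ hinv2 (by simp; omega),
        PySem.List.pyRange_one_cons hhn]
    rfl

-- ---- bridge from M to B's state machine ----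

-- the remainder value B's state machine carries when its batch pointer is at `head`
-- and M's per-minute count list is `counts`
def remB (n : Int) (clients counts : List Int) (head : Int) : Int :=
  if head < (counts.length : Int) then (PySem.List.pyGet? counts head).getD 0
  else bReload n clients head

-- each loop branch strictly decreases the fuel bound
theorem bDecJ (n j m can can' rem r' : Int) (h1 : j < n) :
    bMeas n (j + 1) m can' r' < bMeas n j m can rem := by
  unfold bMeas; split_ifs <;> omega

theorem bDec2 (n j m b rem : Int) (can : Int) (h1 : j < n) (h2 : m < j) :
    bMeas n j j b rem < bMeas n j m can rem := by
  unfold bMeas; split_ifs <;> omega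

theorem bDec3 (n j m b can rem : Int) (h1 : j < n) (h2 : ¬ n ≤ m) (h3 : can ≤ 0) :
    bMeas n j (m + 1) b rem < bMeas n j m can rem := by
  unfold bMeas; split_ifs <;> omega

theorem bDec6 (n j m can rem : Int) (h1 : ¬ can ≤ 0) (h2 : ¬ rem = 0)
    (h3 : ¬ rem - min can rem = 0) :
    bMeas n j m (can - min can rem) (rem - min can rem) < bMeas n j m can rem := by
  unfold bMeas; split_ifs <;> omega

-- the fuel never matters as long as it exceeds the bound
theorem bLoop_ext (n b : Int) (clients : List Int) :
    ∀ (f g : Nat) (j m can rem ans : Int), bMeas n j m can rem < f →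
      bMeas n j m can rem < g →
      bLoop f n b clients j m can rem ans = bLoop g n b clients j m can rem ans := by
  intro f
  induction f with
  | zero => intro g j m can rem ans hf hg; omega
  | succ f ih =>
    intro g j m can rem ans hf hg
    obtain ⟨g', rfl⟩ : ∃ g', g = g' + 1 := ⟨g - 1, by omega⟩
    unfold bLoop
    split_ifs with h1 h2 h3 h4 h5 h6
    · exact ih _ _ _ _ _ _ (by have := bDecJ n j m can can rem (bReload n clients (j+1)) h1; omega)
        (by have := bDecJ n j m can can rem (bReload n clients (j+1)) h1; omega)
    · exact ih _ _ _ _ _ _ (by have := bDec2 n j m b rem can h1 h3; omega)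
        (by have := bDec2 n j m b rem can h1 h3; omega)
    · exact ih _ _ _ _ _ _ (by have := bDec3 n j m b can rem h1 h2 h4; omega)
        (by have := bDec3 n j m b can rem h1 h2 h4; omega)
    · exact ih _ _ _ _ _ _ (by have := bDecJ n j m can can rem (bReload n clients (j+1)) h1; omega)
        (by have := bDecJ n j m can can rem (bReload n clients (j+1)) h1; omega)
    · exact ih _ _ _ _ _ _ (by have := bDecJ n j m can (can - min can rem) rem (bReload n clients (j+1)) h1; omega)
        (by have := bDecJ n j m can (can - min can rem) rem (bReload n clients (j+1)) h1; omega)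
    · exact ih _ _ _ _ _ _ (by have := bDec6 n j m can rem h4 h5 h6; omega)
        (by have := bDec6 n j m can rem h4 h5 h6; omega)
    · rfl

-- the loop's value from a given state, with canonical (always sufficient) fuel
def bRun (n b : Int) (clients : List Int) (j m can rem ans : Int) : Int :=
  bLoop (bMeas n j m can rem + 1) n b clients j m can rem ans

theorem bLoop_exit (n b : Int) (clients : List Int) (j m can rem ans : Int)
    (h : ¬ j < n) : bRun n b clients j m can rem ans = ans := by
  unfold bRun bLoop; rw [if_neg h]

theorem bLoop_over (n b : Int) (clients : List Int) (j m can rem ans : Int)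
    (hj : j < n) (hm : n ≤ m) : bRun n b clients j m can rem ans =
      bRun n b clients (j + 1) m can (bReload n clients (j + 1)) (ans + (n - j + 1) * rem) := by
  unfold bRun bLoop
  rw [if_pos hj, if_pos hm]
  exact bLoop_ext n b clients _ _ _ _ _ _ _
    (bDecJ n j m can can rem (bReload n clients (j+1)) hj) (Nat.lt_succ_self _)

theorem bLoop_idle (n b : Int) (clients : List Int) (j m can rem ans : Int)
    (hj : j < n) (hm : ¬ n ≤ m) (hmj : m < j) : bRun n b clients j m can rem ans =
      bRun n b clients j j b rem ans := by
  unfold bRun bLoop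
  rw [if_pos hj, if_neg hm, if_pos hmj]
  exact bLoop_ext n b clients _ _ _ _ _ _ _ (bDec2 n j m b rem can hj hmj) (Nat.lt_succ_self _)

theorem bLoop_next_minute (n b : Int) (clients : List Int) (j m can rem ans : Int)
    (hj : j < n) (hm : ¬ n ≤ m) (hmj : ¬ m < j) (hcan : can ≤ 0) :
    bRun n b clients j m can rem ans = bRun n b clients j (m + 1) b rem ans := by
  unfold bRun bLoop
  rw [if_pos hj, if_neg hm, if_neg hmj, if_pos hcan]
  exact bLoop_ext n b clients _ _ _ _ _ _ _ (bDec3 n j m b can rem hj hm hcan) (Nat.lt_succ_self _)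

theorem bLoop_zero (n b : Int) (clients : List Int) (j m can rem ans : Int)
    (hj : j < n) (hm : ¬ n ≤ m) (hmj : ¬ m < j) (hcan : ¬ can ≤ 0) (hr : rem = 0) :
    bRun n b clients j m can rem ans =
      bRun n b clients (j + 1) m can (bReload n clients (j + 1)) ans := by
  unfold bRun bLoop
  rw [if_pos hj, if_neg hm, if_neg hmj, if_neg hcan, if_pos hr]
  exact bLoop_ext n b clients _ _ _ _ _ _ _
    (bDecJ n j m can can rem (bReload n clients (j+1)) hj) (Nat.lt_succ_self _)

theorem bLoop_serve_done (n b : Int) (clients : List Int) (j m can rem ans : Int)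
    (hj : j < n) (hm : ¬ n ≤ m) (hmj : ¬ m < j) (hcan : ¬ can ≤ 0) (hr : ¬ rem = 0)
    (hd : rem - min can rem = 0) :
    bRun n b clients j m can rem ans =
      bRun n b clients (j + 1) m (can - min can rem) (bReload n clients (j + 1))
        (ans + (m - j + 1) * min can rem) := by
  unfold bRun bLoop
  rw [if_pos hj, if_neg hm, if_neg hmj, if_neg hcan, if_neg hr, if_pos hd]
  exact bLoop_ext n b clients _ _ _ _ _ _ _
    (bDecJ n j m can (can - min can rem) rem (bReload n clients (j+1)) hj) (Nat.lt_succ_self _)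

theorem bLoop_serve_part (n b : Int) (clients : List Int) (j m can rem ans : Int)
    (hj : j < n) (hm : ¬ n ≤ m) (hmj : ¬ m < j) (hcan : ¬ can ≤ 0) (hr : ¬ rem = 0)
    (hd : ¬ rem - min can rem = 0) :
    bRun n b clients j m can rem ans =
      bRun n b clients j m (can - min can rem) (rem - min can rem)
        (ans + (m - j + 1) * min can rem) := by
  unfold bRun bLoop
  rw [if_pos hj, if_neg hm, if_neg hmj, if_neg hcan, if_neg hr, if_neg hd]
  exact bLoop_ext n b clients _ _ _ _ _ _ _ (bDec6 n j m can rem hcan hr hd) (Nat.lt_succ_self _)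

-- value at a nonnegative index after List.set at another nonnegative index
theorem cnt_set_ne (counts : List Int) (a x i : Int) (h0 : 0 ≤ a) (hi : 0 ≤ i)
    (hne : a.toNat ≠ i.toNat) :
    (PySem.List.pyGet? (counts.set a.toNat x) i).getD 0
      = (PySem.List.pyGet? counts i).getD 0 := by
  rw [PySem.List.pyGet?_of_nonneg _ hi, PySem.List.pyGet?_of_nonneg _ hi,
      List.getElem?_set_ne hne]

theorem cnt_set_self (counts : List Int) (a x : Int) (h0 : 0 ≤ a)
    (hlt : a.toNat < counts.length) :
    (PySem.List.pyGet? (counts.set a.toNat x) a).getD 0 = x := by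
  rw [PySem.List.pyGet?_of_nonneg _ h0, List.getElem?_set_self hlt]; rfl

theorem cnt_append_left (counts : List Int) (x i : Int) (hi : 0 ≤ i)
    (hlt : i < (counts.length : Int)) :
    (PySem.List.pyGet? (counts ++ [x]) i).getD 0 = (PySem.List.pyGet? counts i).getD 0 := by
  rw [PySem.List.pyGet?_of_nonneg _ hi, PySem.List.pyGet?_of_nonneg _ hi,
      List.getElem?_append_left (by omega)]

theorem cnt_append_self (counts : List Int) (x : Int) :
    (PySem.List.pyGet? (counts ++ [x]) (counts.length : Int)).getD 0 = x := by
  rw [show counts ++ [x] = counts ++ x :: [] by simp, PySem.List.pyGet?_append_length]; rfl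

theorem bLoop_drain (n b : Int) (clients : List Int) :
    ∀ (d : Nat) (head can rem ans : Int) (counts : List Int),
      0 ≤ head → head + (d : Int) = n → (counts.length : Int) = n →
      (head < n → rem = (PySem.List.pyGet? counts head).getD 0) →
      (∀ i : Int, head < i → i < n →
        (PySem.List.pyGet? counts i).getD 0 = (PySem.List.pyGet? clients i).getD 0) →
      bRun n b clients head n can rem ans =
        (PySem.List.pyRange head n 1).foldl
          (fun a i => a + (n - i + 1) * (PySem.List.pyGet? counts i).getD 0) ans := by
  intro d
  induction d with
  | zero =>
    intro head can rem ans counts h0 hdn hlen hrem hsuf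
    rw [bLoop_exit _ _ _ _ _ _ _ _ (by omega : ¬ head < n),
        PySem.List.pyRange_one_eq_nil (by omega : n ≤ head)]
    rfl
  | succ d ih =>
    intro head can rem ans counts h0 hdn hlen hrem hsuf
    have hh : head < n := by push_cast at hdn; omega
    rw [bLoop_over _ _ _ _ _ _ _ _ hh le_rfl, PySem.List.pyRange_one_cons hh]
    simp only [List.foldl_cons]
    rw [hrem hh]
    exact ih (head + 1) can _ _ counts (by omega) (by push_cast at hdn ⊢; omega) hlen
      (fun h1 => by
        unfold bReload
        rw [if_pos h1, (hsuf (head + 1) (by omega) h1)])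
      (fun i hi1 hi2 => hsuf i (by omega) hi2)

theorem serve_sim (n b : Int) (clients : List Int) (m : Int) (hm0 : 0 ≤ m) (hmn : m < n) :
    ∀ (fuel : Nat) (can ans head : Int) (counts : List Int),
      0 ≤ head → head ≤ m + 1 → (counts.length : Int) = m + 1 →
      (∀ i : Int, head < i → i ≤ m →
        (PySem.List.pyGet? counts i).getD 0 = (PySem.List.pyGet? clients i).getD 0) →
      (m + 1 - head).toNat + 1 ≤ fuel →
      ∃ ans' head' counts',
        innerM fuel m can ans head counts = (ans', head', counts') ∧
        head ≤ head' ∧ head' ≤ m + 1 ∧ (counts'.length : Int) = m + 1 ∧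
        (∀ i : Int, head' < i →
          (PySem.List.pyGet? counts' i).getD 0 = (PySem.List.pyGet? counts i).getD 0) ∧
        bRun n b clients head m can (remB n clients counts head) ans =
          bRun n b clients head' (m + 1) b (remB n clients counts' head') ans' := by
  intro fuel
  induction fuel with
  | zero => intro can ans head counts h0 hle hlen hsuf hfuel; omega
  | succ f ih =>
    intro can ans head counts h0 hle hlen hsuf hfuel
    by_cases hc : head ≤ m ∧ can > 0
    · obtain ⟨hhm, hcan⟩ := hc
      have hhead_lt : head < (counts.length : Int) := by omega
      have hremB : remB n clients counts head = (PySem.List.pyGet? counts head).getD 0 := by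
        unfold remB; rw [if_pos hhead_lt]
      set c : Int := (PySem.List.pyGet? counts head).getD 0 with hc_def
      unfold innerM
      rw [if_pos (show head ≤ m ∧ can > 0 from ⟨hhm, hcan⟩)]
      simp only []
      rw [PySem.List.pySetD_of_nonneg _ _ h0]
      by_cases hcnt : c - min can c = 0
      · -- batch finished (or empty): both sides advance to batch head+1
        rw [if_pos hcnt]
        have hlen1 : ((counts.set head.toNat (c - min can c)).length : Int) = m + 1 := by
          simpa using hlen
        obtain ⟨ans', head', counts', hM, hge, hle', hlen', hunch, hbl⟩ :=
          ih (can - min can c) (ans + (m - head + 1) * min can c) (head + 1)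
            (counts.set head.toNat (c - min can c)) (by omega) (by omega) hlen1
            (fun i hi1 hi2 => by
              rw [cnt_set_ne _ _ _ _ h0 (by omega) (by omega)]
              exact hsuf i (by omega) hi2)
            (by omega)
        refine ⟨ans', head', counts', hM, by omega, hle', hlen', ?_, ?_⟩
        · intro i hi
          rw [hunch i hi, cnt_set_ne _ _ _ _ h0 (by omega) (by omega)]
        · -- the reload value B picks up equals remB of the updated counts at head+1
          have hreload : bReload n clients (head + 1)
              = remB n clients (counts.set head.toNat (c - min can c)) (head + 1) := by
            unfold remB
            by_cases h1 : head + 1 < ((counts.set head.toNat (c - min can c)).length : Int)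
            · rw [if_pos h1, cnt_set_ne _ _ _ _ h0 (by omega) (by omega)]
              unfold bReload
              rw [if_pos (by omega : head + 1 < n),
                  hsuf (head + 1) (by omega) (by simp at h1; omega)]
            · rw [if_neg h1]
          by_cases hc0 : c = 0
          · -- zero batch: Source B takes its `rem == 0` branch
            have hmin : min can c = 0 := by omega
            rw [hremB, bLoop_zero _ _ _ _ _ _ _ _ (by omega) (by omega) (by omega)
                  (by omega) (by omega), hreload]
            rw [show ans + (m - head + 1) * min can c = ans by rw [hmin]; ring,
                show can - min can c = can by rw [hmin]; ring] at hbl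
            exact hbl
          · -- batch fully served this step
            rw [hremB, bLoop_serve_done _ _ _ _ _ _ _ _ (by omega) (by omega) (by omega)
                  (by omega) hc0 hcnt, hreload]
            exact hbl
      · -- capacity exhausted on this batch: remainder stays, minute advances
        rw [if_neg hcnt]
        have hminc : min can c = can := by rcases min_choice can c with h | h <;> omega
        rw [innerM_stop _ _ _ _ _ _ (by omega)]
        refine ⟨ans + (m - head + 1) * min can c, head,
          counts.set head.toNat (c - min can c), rfl, le_rfl, hle,
          by simpa using hlen, ?_, ?_⟩
        · intro i hi
          exact cnt_set_ne _ _ _ _ h0 (by omega) (by omega)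
        · have hrem' : remB n clients (counts.set head.toNat (c - min can c)) head
              = c - min can c := by
            unfold remB
            rw [if_pos (by simpa using hhead_lt), cnt_set_self _ _ _ h0 (by omega)]
          rw [hremB, hrem',
              bLoop_serve_part _ _ _ _ _ _ _ _ (by omega) (by omega) (by omega)
                (by omega) (by omega) hcnt,
              bLoop_next_minute _ _ _ _ _ _ _ _ (by omega) (by omega) (by omega) (by omega)]
    · rw [innerM_stop _ _ _ _ _ _ hc]
      refine ⟨ans, head, counts, rfl, le_rfl, hle, hlen, fun i _ => rfl, ?_⟩
      by_cases hhm : head ≤ m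
      · -- can ≤ 0: Source B moves to the next minute
        rw [bLoop_next_minute _ _ _ _ _ _ _ _ (by omega) (by omega) (by omega) (by omega)]
      · -- queue empty (head = m + 1): Source B is idle until batch head arrives
        by_cases hn2 : head < n
        · rw [bLoop_idle _ _ _ _ _ _ _ _ hn2 (by omega) (by omega),
              show head = m + 1 by omega]
        · rw [bLoop_exit _ _ _ _ _ _ _ _ hn2, bLoop_exit _ _ _ _ _ _ _ _ (by omega)]

theorem chain_sim {n b : Int} {clients : List Int}
    (hn : 0 < n) (hcl : n ≤ (clients.length : Int)) :
    ∀ k : Nat, (k : Int) ≤ n →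
      ∃ ans head counts,
        (PySem.List.pyRange 0 (k : Int) 1).foldl (stepM b clients) (some (0, 0, []))
          = some (ans, head, counts) ∧
        0 ≤ head ∧ head ≤ (k : Int) ∧ (counts.length : Int) = k ∧
        (∀ i : Int, head < i → i < (k : Int) →
          (PySem.List.pyGet? counts i).getD 0 = (PySem.List.pyGet? clients i).getD 0) ∧
        order_checkout_place_alt n b clients
          = bRun n b clients head (k : Int) b (remB n clients counts head) ans := by
  intro k
  induction k with
  | zero =>
    intro _
    refine ⟨0, 0, [], ?_, le_rfl, by norm_num, by norm_num, ?_, ?_⟩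
    · rw [show ((0 : Nat) : Int) = 0 by simp, PySem.List.pyRange_one_eq_nil le_rfl]; rfl
    · intro i hi1 hi2; norm_num at hi1 hi2; omega
    · rw [show ((0 : Nat) : Int) = 0 by simp]
      unfold order_checkout_place_alt remB
      rw [if_neg (by norm_num)]
      rfl
  | succ k ih =>
    intro hk1
    have hk : (k : Int) ≤ n := by push_cast at hk1 ⊢; omega
    have hkn : (k : Int) < n := by push_cast at hk1; omega
    have hk0 : (0 : Int) ≤ (k : Int) := Int.natCast_nonneg k
    obtain ⟨ans, head, counts, hM, h0, hhk, hlen, hsuf, heq⟩ := ih hk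
    have hkl : k < clients.length := by omega
    have hget : PySem.List.pyGet? clients (k : Int) = some clients[k] := by
      simp [List.getElem?_eq_getElem hkl]
    have hclen' : counts.length = k := by omega
    have hcliv : (PySem.List.pyGet? clients (k : Int)).getD 0 = clients[k] := by
      rw [hget]; rfl
    have hsuf1 : ∀ i : Int, head < i → i ≤ (k : Int) →
        (PySem.List.pyGet? (counts ++ [clients[k]]) i).getD 0
          = (PySem.List.pyGet? clients i).getD 0 := by
      intro i hi1 hi2
      rcases eq_or_lt_of_le hi2 with heqk | hlt
      · rw [show i = (counts.length : Int) by omega, cnt_append_self]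
        rw [show ((counts.length : Nat) : Int) = (k : Int) by omega, hcliv]
      · rw [cnt_append_left _ _ _ (by omega) (by omega)]
        exact hsuf i hi1 (by omega)
    obtain ⟨ans', head', counts', hMi, hge, hle', hlen', hunch, hbl⟩ :=
      serve_sim n b clients (k : Int) hk0 hkn (((k : Int) - head + 1).toNat + 1) b ans head
        (counts ++ [clients[k]]) h0 (by omega) (by simp [hclen']) hsuf1 (by omega)
    have hrange : PySem.List.pyRange 0 ((k + 1 : Nat) : Int) 1
        = PySem.List.pyRange 0 (k : Int) 1 ++ [(k : Int)] := by
      rw [show ((k + 1 : Nat) : Int) = (k : Int) + 1 by push_cast; ring]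
      exact PySem.List.pyRange_one_succ_right hk0
    refine ⟨ans', head', counts', ?_, by omega, by push_cast; omega,
      by push_cast; omega, ?_, ?_⟩
    · rw [hrange, List.foldl_append, hM]
      simp only [List.foldl_cons, List.foldl_nil, stepM, hget]
      rw [hMi]
    · intro i hi1 hi2
      rw [hunch i hi1]
      have hik : i ≤ (k : Int) := by push_cast at hi2; omega
      exact hsuf1 i (by omega) hik
    · -- the boundary remainder is unchanged by the arrival of batch k
      have hrB : remB n clients counts head = remB n clients (counts ++ [clients[k]]) head := by
        unfold remB
        by_cases hhlt : head < (counts.length : Int)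
        · rw [if_pos hhlt, if_pos (by simp; omega),
              cnt_append_left _ _ _ h0 (by omega)]
        · have hhead : head = (k : Int) := by omega
          rw [if_neg hhlt, if_pos (by simp; omega), hhead,
              show (k : Int) = (counts.length : Int) by omega, cnt_append_self]
          unfold bReload
          rw [if_pos (by omega : (counts.length : Int) < n)]
          rw [show (counts.length : Int) = (k : Int) by omega, hcliv]
      rw [heq, hrB, hbl, show ((k + 1 : Nat) : Int) = (k : Int) + 1 by push_cast; ring]

-- ===== VERDICT (by name: the statement is the Claim_ definition above) =====
theorem order_checkout_place_spec : Claim_equal_order_checkout_place := by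
  intro n b clients _ hpre
  unfold Spec_order_checkout_place
  by_cases hn : 0 < n
  · have hcl : n ≤ (clients.length : Int) := hpre hn
    obtain ⟨ansA, headA, countsA, q, hA, hMA, hinv, _⟩ :=
      outer_sim (b := b) hn hcl n.toNat (by omega)
    obtain ⟨ans, head, counts, hM, h0, hhk, hlen, hsuf, heq⟩ :=
      chain_sim (b := b) hn hcl n.toNat (by omega)
    have hnn : ((n.toNat : Nat) : Int) = n := by omega
    rw [hnn] at hA hMA hinv hM hhk hlen hsuf heq
    rw [hMA] at hM
    obtain ⟨e1, e2, e3⟩ : ansA = ans ∧ headA = head ∧ countsA = counts := by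
      simpa using hM
    rw [← e1] at heq
    rw [← e2] at heq hsuf hhk h0
    rw [← e3] at heq hsuf hlen
    unfold order_checkout_place
    rw [hA]
    simp only []
    rw [drain_sim hn q.size.toNat headA ansA q hinv rfl, heq,
        bLoop_drain n b clients (n - headA).toNat headA b _ ansA countsA h0
          (by omega) hlen
          (fun hh => by unfold remB; rw [if_pos (by omega : headA < (countsA.length : Int))])
          hsuf]
    rfl
  · unfold order_checkout_place order_checkout_place_alt
    rw [PySem.List.pyRange_one_eq_nil (by omega : n ≤ 0)]
    rw [show bLoop (bMeas n 0 0 b (bReload n clients 0) + 1) n b clients 0 0 b (bReload n clients 0) 0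
          = bRun n b clients 0 0 b (bReload n clients 0) 0 from rfl,
        bLoop_exit _ _ _ _ _ _ _ _ (by omega : ¬ (0 : Int) < n)]
    simp [drainA, pyQueueInit]
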